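-- pv_equiv track=rewrite | github.com/Taewan-P/python_study | exercise_2017/10th_week_canceled/sliding_puzzle_test.py | create_goal_board
-- ===== SOURCE A (Python) =====
-- def create_goal_board(size):
-- 	board_1 = []
-- 	goal_board = []
-- 	for i in range(1,(size**2)+1):
-- 		board_1.append(i)
--
-- 	for h in range(0,size):
-- 		temp = []
-- 		for j in range(0,size):
-- 			temp.append(board_1[j])
-- 		board_1 = board_1[size:]
-- 		goal_board.append(temp)
--
-- 	goal_board[size-1][size-1] = 0
-- 	return goal_board
-- ===== SOURCE B (Python) =====
-- def create_goal_board(size):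
--     goal_board = [[i * size + j + 1 for j in range(size)] for i in range(size)]
--     goal_board[size - 1][size - 1] = 0
--     return goal_board
-- ===== Notes on version B (the rewrite author's own statement) =====
-- stated objective: faster
-- what changed: B computes each cell directly from its coordinates in one nested comprehension (value i*size+j+1), removing A's intermediate flat 1..n^2 list and the per-row board_1[size:] reslicing that recopies the remaining flat list for every row.
import Mathlib
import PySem

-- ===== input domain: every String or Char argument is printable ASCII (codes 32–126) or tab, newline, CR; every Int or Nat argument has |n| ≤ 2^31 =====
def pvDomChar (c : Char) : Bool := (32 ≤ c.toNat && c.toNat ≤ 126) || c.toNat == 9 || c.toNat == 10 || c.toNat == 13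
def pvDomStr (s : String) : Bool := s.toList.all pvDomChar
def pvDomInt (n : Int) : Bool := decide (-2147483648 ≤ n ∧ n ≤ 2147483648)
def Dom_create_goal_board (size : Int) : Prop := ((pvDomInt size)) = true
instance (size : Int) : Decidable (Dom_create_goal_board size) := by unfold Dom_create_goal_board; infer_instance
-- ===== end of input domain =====

-- B computes each cell directly from its coordinates (i*size + j + 1), removing A's flat 1..n^2 list
-- and its per-row reslicing (measured faster); return-value equivalence proved on size ≥ 1.

-- ===== PORT A =====
def create_goal_board (size : Int) : List (List Int) :=
  let board_1 : List Int :=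
    (PySem.List.pyRange 1 (size ^ 2 + 1) 1).foldl (fun acc i => acc ++ [i]) []
  let st :=
    (PySem.List.pyRange 0 size 1).foldl
      (fun (st : List Int × List (List Int)) _h =>
        let temp :=
          (PySem.List.pyRange 0 size 1).foldl
            (fun t j => t ++ [PySem.List.pyGetD st.1 j 0]) []
        (PySem.List.slice st.1 (some size) none, st.2 ++ [temp]))
      (board_1, [])
  let goal_board := st.2
  PySem.List.pySetD goal_board (size - 1)
    (PySem.List.pySetD (PySem.List.pyGetD goal_board (size - 1) []) (size - 1) 0)

-- ===== PORT B =====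
def create_goal_board_alt (size : Int) : List (List Int) :=
  let goal_board :=
    (PySem.List.pyRange 0 size 1).map (fun i =>
      (PySem.List.pyRange 0 size 1).map (fun j => i * size + j + 1))
  PySem.List.pySetD goal_board (size - 1)
    (PySem.List.pySetD (PySem.List.pyGetD goal_board (size - 1) []) (size - 1) 0)

-- ===== PRECONDITION & SPEC =====
-- A raises IndexError for size ≤ 0 (goal_board[size-1] on the empty board), so Pre_ requires 1 ≤ size.
def Pre_create_goal_board (size : Int) : Prop := 1 ≤ size
instance (size : Int) : Decidable (Pre_create_goal_board size) := by unfold Pre_create_goal_board; infer_instance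
def pvWitness_create_goal_board : Int := (3)

def Spec_create_goal_board (size : Int) (out : List (List Int)) : Prop := out = create_goal_board_alt size
instance (size : Int) (out : List (List Int)) : Decidable (Spec_create_goal_board size out) := by unfold Spec_create_goal_board; infer_instance

-- ===== CLAIM (what is proved, stated in full; the proofs are below) =====
def Claim_equal_create_goal_board : Prop := ∀ (size : Int), Dom_create_goal_board size → Pre_create_goal_board size → Spec_create_goal_board size (create_goal_board size)

-- ===== LEMMAS AND PROOFS =====

theorem foldl_append_id (l acc : List Int) :
    l.foldl (fun acc i => acc ++ [i]) acc = acc ++ l := by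
  induction l generalizing acc with
  | nil => simp
  | cons x xs ih => simp [List.foldl, ih]

theorem foldl_append_row {α β : Type} (f : β → α) (l : List β) (acc : List α) :
    l.foldl (fun t j => t ++ [f j]) acc = acc ++ l.map f := by
  induction l generalizing acc with
  | nil => simp
  | cons x xs ih => simp [List.foldl, ih]


def pvRow (size : Int) (b : List Int) : List Int :=
  (PySem.List.pyRange 0 size 1).map (fun j => PySem.List.pyGetD b j 0)

theorem inner_loop_eq_row (size : Int) (b : List Int) :
    (PySem.List.pyRange 0 size 1).foldl (fun t j => t ++ [PySem.List.pyGetD b j 0]) []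
      = pvRow size b := by
  simpa [pvRow] using foldl_append_row (fun j => PySem.List.pyGetD b j 0) (PySem.List.pyRange 0 size 1) []

theorem outer_loop (size : Int) (hs : 0 ≤ size) (l : List Int) :
    ∀ (b : List Int) (acc : List (List Int)),
    (l.foldl
      (fun (st : List Int × List (List Int)) _h =>
        (PySem.List.slice st.1 (some size) none,
         st.2 ++ [(PySem.List.pyRange 0 size 1).foldl (fun t j => t ++ [PySem.List.pyGetD st.1 j 0]) []]))
      (b, acc)).2
      = acc ++ (List.range l.length).map (fun h => pvRow size (b.drop (h * size.toNat))) := by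
  induction l with
  | nil => intro b acc; simp
  | cons x xs ih =>
    intro b acc
    rw [List.foldl_cons]
    simp only []
    rw [inner_loop_eq_row, PySem.List.slice_from b hs, ih]
    rw [List.length_cons, List.range_succ_eq_map]
    simp only [List.append_assoc, List.singleton_append, List.drop_drop]
    congr 2
    · simp
    · rw [List.map_map]
      apply List.map_congr_left
      intro h _
      simp only [Function.comp_apply]
      rw [Nat.succ_mul, Nat.add_comm]


theorem cell_eq (size : Int) (hs : 1 ≤ size) (h : Nat) (hh : h < size.toNat)
    (j : Int) (hj0 : 0 ≤ j) (hj : j < size) :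
    PySem.List.pyGetD ((PySem.List.pyRange 1 (size ^ 2 + 1) 1).drop (h * size.toNat)) j 0
      = (h : Int) * size + j + 1 := by
  have hsz : size = (size.toNat : Int) := by omega
  set n := size.toNat with hn
  have hflat : PySem.List.pyRange 1 (size ^ 2 + 1) 1
      = (List.range (n * n)).map (fun (k : Nat) => 1 + (k : Int)) := by
    have h2 : size ^ 2 + 1 - 1 = ((n * n : Nat) : Int) := by rw [hsz]; push_cast; ring
    rw [PySem.List.pyRange_one, h2, Int.toNat_natCast]
  obtain ⟨jn, rfl⟩ : ∃ jn : Nat, j = (jn : Int) := ⟨j.toNat, by omega⟩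
  have hjn : jn < n := by omega
  rw [hflat, PySem.List.pyGetD_natCast, List.getD_eq_getElem?_getD, List.getElem?_drop,
    List.getElem?_map, List.getElem?_range (by nlinarith : h * n + jn < n * n)]
  simp only [Option.map_some, Option.getD_some]
  rw [hsz]
  push_cast
  ring

theorem boards_eq (size : Int) (hs : 1 ≤ size) :
    (List.range (PySem.List.pyRange 0 size 1).length).map
        (fun h => pvRow size ((PySem.List.pyRange 1 (size ^ 2 + 1) 1).drop (h * size.toNat)))
      = (PySem.List.pyRange 0 size 1).map (fun i =>
          (PySem.List.pyRange 0 size 1).map (fun j => i * size + j + 1)) := by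
  unfold pvRow
  rw [PySem.List.pyRange_one 0 size]
  simp only [Int.sub_zero, List.map_map, Function.comp_def, Int.zero_add,
    List.length_map, List.length_range]
  apply List.map_congr_left
  intro h hh
  rw [List.mem_range] at hh
  apply List.map_congr_left
  intro j hj
  rw [List.mem_range] at hj
  exact cell_eq size hs h hh (j : Int) (by positivity) (by omega)

theorem create_goal_board_spec : Claim_equal_create_goal_board := by
  intro size _hdom hpre
  unfold Spec_create_goal_board
  simp only [create_goal_board, create_goal_board_alt]
  have hs0 : (0 : Int) ≤ size := by exact le_trans (by norm_num) hpre
  rw [foldl_append_id, List.nil_append, outer_loop size hs0, List.nil_append, boards_eq size hpre]
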